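-- pv_equiv track=rewrite | github.com/JohnYanez95/ev-battery-health-monitor | backend/simulation/simulator.py | _find_activity_periods
-- ===== SOURCE A (Python) =====
-- from typing import Dict, List, Optional, Tuple
--
-- def _find_activity_periods(
--
--     records: List[Dict],
--     field: str,
--     value: any
-- ) -> List[Tuple[int, int]]:
--     """Find continuous periods where field equals value."""
--     periods = []
--     start = None
--
--     for i, record in enumerate(records):
--         if record.get(field) == value:
--             if start is None:
--                 start = i
--         else:
--             if start is not None:
--                 periods.append((start, i))
--                 start = None
--
--     if start is not None:
--         periods.append((start, len(records)))
--
--     return periods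
-- ===== SOURCE B (Python) =====
-- from itertools import groupby
--
-- def _find_activity_periods(records, field, value):
--     """Find continuous periods where field equals value (run-partitioning via groupby)."""
--     periods = []
--     idx = 0
--     for key, grp in groupby(record.get(field) == value for record in records):
--         length = sum(1 for _ in grp)
--         if key:
--             periods.append((idx, idx + length))
--         idx += length
--     return periods
-- ===== Notes on version B (the rewrite author's own statement) =====
-- stated objective: idiomatic
-- what changed: Replaces the start/None state machine with an itertools.groupby run-partitioning pass that emits one period per True run, computing the end as start+run_length.
import Mathlib
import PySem

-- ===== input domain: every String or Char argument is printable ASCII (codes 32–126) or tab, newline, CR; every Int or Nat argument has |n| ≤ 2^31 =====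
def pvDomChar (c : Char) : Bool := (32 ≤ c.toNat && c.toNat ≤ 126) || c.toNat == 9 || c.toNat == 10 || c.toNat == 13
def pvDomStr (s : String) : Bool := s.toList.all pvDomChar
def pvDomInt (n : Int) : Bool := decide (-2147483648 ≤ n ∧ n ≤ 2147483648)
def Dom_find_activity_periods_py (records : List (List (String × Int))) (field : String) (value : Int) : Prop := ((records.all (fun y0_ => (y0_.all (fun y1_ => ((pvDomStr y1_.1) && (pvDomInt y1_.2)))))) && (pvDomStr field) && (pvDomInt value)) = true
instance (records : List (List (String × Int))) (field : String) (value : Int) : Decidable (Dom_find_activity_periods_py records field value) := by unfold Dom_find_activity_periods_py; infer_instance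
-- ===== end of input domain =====

-- B replaces A's start/None state machine with a groupby-style run-partitioning pass
-- (one period per maximal True run, end = start + run length); objective: idiomatic, same cost.

-- record.get(field) == value  (Python dict lookup; the shared condition expression of both programs)
def pvMatches (record : List (String × Int)) (field : String) (value : Int) : Bool :=
  (PySem.Dict.mk record).get? field == some value

-- ===== PORT A =====
-- A's for-loop over enumerate(records) threading (periods, start) and the index i
def pvALoop (field : String) (value : Int) :
    List (Int × Int) → Option Int → Int → List (List (String × Int)) →
    List (Int × Int) × Option Int
  | periods, start, _, [] => (periods, start)
  | periods, start, i, record :: rest =>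
    if pvMatches record field value then
      match start with
      | none => pvALoop field value periods (some i) (i + 1) rest
      | some s => pvALoop field value periods (some s) (i + 1) rest
    else
      match start with
      | some s => pvALoop field value (periods ++ [(s, i)]) none (i + 1) rest
      | none => pvALoop field value periods none (i + 1) rest

def find_activity_periods_py (records : List (List (String × Int))) (field : String) (value : Int) : List (Int × Int) :=
  match pvALoop field value [] none 0 records with
  | (periods, some s) => periods ++ [(s, (records.length : Int))]
  | (periods, none) => periods

-- ===== PORT B =====
-- B's groupby loop: peel off the maximal run equal to the head boolean, emit a period iff the run is True
def pvBLoop : Int → List Bool → List (Int × Int)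
  | _, [] => []
  | idx, b :: rest =>
    let len : Int := 1 + ((rest.takeWhile (fun x => x == b)).length : Int)
    (if b then [(idx, idx + len)] else []) ++ pvBLoop (idx + len) (rest.dropWhile (fun x => x == b))
termination_by _ bs => bs.length
decreasing_by
  simp only [List.length_cons]
  exact Nat.lt_succ_of_le (List.length_dropWhile_le _ _)

def find_activity_periods_py_alt (records : List (List (String × Int))) (field : String) (value : Int) : List (Int × Int) :=
  pvBLoop 0 (records.map (fun r => pvMatches r field value))

-- ===== PRECONDITION & SPEC =====
def Spec_find_activity_periods_py (records : List (List (String × Int))) (field : String) (value : Int) (out : List (Int × Int)) : Prop := out = find_activity_periods_py_alt records field value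
instance (records : List (List (String × Int))) (field : String) (value : Int) (out : List (Int × Int)) : Decidable (Spec_find_activity_periods_py records field value out) := by unfold Spec_find_activity_periods_py; infer_instance

-- ===== CLAIM (what is proved, stated in full; the proofs are below) =====
def Claim_equal_find_activity_periods_py : Prop := ∀ (records : List (List (String × Int))) (field : String) (value : Int), Dom_find_activity_periods_py records field value → Spec_find_activity_periods_py records field value (find_activity_periods_py records field value)

-- ===== LEMMAS AND PROOFS =====

-- A's loop, restated over the list of per-record booleans
def pvALoopB : List (Int × Int) → Option Int → Int → List Bool → List (Int × Int) × Option Int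
  | periods, start, _, [] => (periods, start)
  | periods, start, i, b :: rest =>
    if b then
      match start with
      | none => pvALoopB periods (some i) (i + 1) rest
      | some s => pvALoopB periods (some s) (i + 1) rest
    else
      match start with
      | some s => pvALoopB (periods ++ [(s, i)]) none (i + 1) rest
      | none => pvALoopB periods none (i + 1) rest

def pvFinish (n : Int) : List (Int × Int) × Option Int → List (Int × Int)
  | (periods, some s) => periods ++ [(s, n)]
  | (periods, none) => periods

theorem pvBLoop_nil (i : Int) : pvBLoop i [] = [] := by
  simp [pvBLoop]

theorem pvBLoop_cons (idx : Int) (b : Bool) (rest : List Bool) :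
    pvBLoop idx (b :: rest) =
      (if b then [(idx, idx + (1 + ((rest.takeWhile (fun x => x == b)).length : Int)))] else []) ++
        pvBLoop (idx + (1 + ((rest.takeWhile (fun x => x == b)).length : Int)))
          (rest.dropWhile (fun x => x == b)) := by
  rw [pvBLoop]

theorem pvALoopB_nil (periods : List (Int × Int)) (st : Option Int) (i : Int) :
    pvALoopB periods st i [] = (periods, st) := rfl

theorem pvALoopB_true_none (periods : List (Int × Int)) (i : Int) (rest : List Bool) :
    pvALoopB periods none i (true :: rest) = pvALoopB periods (some i) (i + 1) rest := by
  simp [pvALoopB]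

theorem pvALoopB_true_some (periods : List (Int × Int)) (s i : Int) (rest : List Bool) :
    pvALoopB periods (some s) i (true :: rest) = pvALoopB periods (some s) (i + 1) rest := by
  simp [pvALoopB]

theorem pvALoopB_false_none (periods : List (Int × Int)) (i : Int) (rest : List Bool) :
    pvALoopB periods none i (false :: rest) = pvALoopB periods none (i + 1) rest := by
  simp [pvALoopB]

theorem pvALoopB_false_some (periods : List (Int × Int)) (s i : Int) (rest : List Bool) :
    pvALoopB periods (some s) i (false :: rest) =
      pvALoopB (periods ++ [(s, i)]) none (i + 1) rest := by
  simp [pvALoopB]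

theorem pvALoop_eq_B (field : String) (value : Int) :
    ∀ (records : List (List (String × Int))) (periods : List (Int × Int)) (start : Option Int) (i : Int),
      pvALoop field value periods start i records =
        pvALoopB periods start i (records.map (fun r => pvMatches r field value)) := by
  intro records
  induction records with
  | nil => intro _ _ _; rfl
  | cons r rest ih =>
      intro periods start i
      simp only [pvALoop, pvALoopB, List.map]
      cases h : pvMatches r field value <;> cases start <;> simp [ih]

theorem pvConsume_true :
    ∀ (run : List Bool), (∀ x ∈ run, x = true) →
      ∀ (periods : List (Int × Int)) (s i : Int) (rest : List Bool),
        pvALoopB periods (some s) i (run ++ rest) =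
          pvALoopB periods (some s) (i + (run.length : Int)) rest := by
  intro run
  induction run with
  | nil => intro _ periods s i rest; simp
  | cons b bs ih =>
      intro h periods s i rest
      have hb : b = true := h b (by simp)
      subst hb
      have hx : i + (((true :: bs).length : ℕ) : Int) = (i + 1) + ((bs.length : ℕ) : Int) := by
        push_cast [List.length_cons]; ring
      rw [hx, List.cons_append, pvALoopB_true_some]
      exact ih (fun x hx => h x (List.mem_cons_of_mem _ hx)) periods s (i + 1) rest

theorem pvConsume_false :
    ∀ (run : List Bool), (∀ x ∈ run, x = false) →
      ∀ (periods : List (Int × Int)) (i : Int) (rest : List Bool),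
        pvALoopB periods none i (run ++ rest) =
          pvALoopB periods none (i + (run.length : Int)) rest := by
  intro run
  induction run with
  | nil => intro _ periods i rest; simp
  | cons b bs ih =>
      intro h periods i rest
      have hb : b = false := h b (by simp)
      subst hb
      have hx : i + (((false :: bs).length : ℕ) : Int) = (i + 1) + ((bs.length : ℕ) : Int) := by
        push_cast [List.length_cons]; ring
      rw [hx, List.cons_append, pvALoopB_false_none]
      exact ih (fun x hx => h x (List.mem_cons_of_mem _ hx)) periods (i + 1) rest

theorem pvDropWhile_head_false {α : Type} (p : α → Bool) :
    ∀ (l : List α) (x : α) (xs : List α), l.dropWhile p = x :: xs → p x = false := by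
  intro l
  induction l with
  | nil => intro x xs h; simp [List.dropWhile] at h
  | cons a l ih =>
      intro x xs h
      by_cases ha : p a = true
      · exact ih x xs (by simpa [List.dropWhile, ha] using h)
      · simp only [List.dropWhile, ha] at h
        injection h with h1 _
        subst h1
        simpa using ha

theorem pvMain :
    ∀ (n : ℕ) (bs : List Bool), bs.length = n →
      ∀ (periods : List (Int × Int)) (i : Int),
        pvFinish (i + (bs.length : Int)) (pvALoopB periods none i bs) = periods ++ pvBLoop i bs := by
  intro n
  induction n using Nat.strong_induction_on with
  | _ n ih =>
    intro bs hn periods i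
    match bs with
    | [] => simp [pvALoopB_nil, pvBLoop_nil, pvFinish]
    | true :: rest =>
      have hsplit : rest.takeWhile (fun x => x == true) ++ rest.dropWhile (fun x => x == true) = rest :=
        List.takeWhile_append_dropWhile
      have hrun : ∀ x ∈ rest.takeWhile (fun x => x == true), x = true := by
        intro x hx
        simpa using List.mem_takeWhile_imp hx
      have hlen2 : (rest.takeWhile (fun x => x == true)).length +
          (rest.dropWhile (fun x => x == true)).length = rest.length := by
        rw [← List.length_append, hsplit]
      rw [pvBLoop_cons, pvALoopB_true_none]
      rw [show pvALoopB periods (some i) (i + 1) rest =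
            pvALoopB periods (some i)
              (i + (1 + ((rest.takeWhile (fun x => x == true)).length : Int)))
              (rest.dropWhile (fun x => x == true)) from by
        conv_lhs => rw [← hsplit]
        rw [pvConsume_true _ hrun,
          show (i + 1) + ((rest.takeWhile (fun x => x == true)).length : Int) =
            i + (1 + ((rest.takeWhile (fun x => x == true)).length : Int)) from by ring]]
      cases htail : rest.dropWhile (fun x => x == true) with
      | nil =>
        rw [htail] at hlen2
        simp only [List.length_nil, Nat.add_zero] at hlen2
        rw [pvALoopB_nil, pvBLoop_nil,
          show i + (((true :: rest).length : ℕ) : Int) =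
            i + (1 + ((rest.takeWhile (fun x => x == true)).length : Int)) from by
          push_cast [List.length_cons]
          omega]
        simp [pvFinish]
      | cons c tail' =>
        have hc : c = false := by
          simpa using pvDropWhile_head_false (fun x => x == true) rest c tail' htail
        subst hc
        rw [pvALoopB_false_some]
        have hlt : (false :: tail').length < n := by
          have h1 : (rest.dropWhile (fun x => x == true)).length ≤ rest.length :=
            List.length_dropWhile_le _ _
          rw [htail] at h1
          simp only [List.length_cons] at h1 hn ⊢
          omega
        have hlen3 : (rest.takeWhile (fun x => x == true)).length + (tail'.length + 1) = rest.length := by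
          rw [htail] at hlen2
          simpa using hlen2
        have hIH := ih (false :: tail').length hlt (false :: tail') rfl
          (periods ++ [(i, i + (1 + ((rest.takeWhile (fun x => x == true)).length : Int)))])
          (i + (1 + ((rest.takeWhile (fun x => x == true)).length : Int)))
        rw [pvALoopB_false_none] at hIH
        rw [show i + (((true :: rest).length : ℕ) : Int) =
              (i + (1 + ((rest.takeWhile (fun x => x == true)).length : Int))) +
                (((false :: tail').length : ℕ) : Int) from by
          push_cast [List.length_cons]
          omega]
        rw [hIH]
        simp [List.append_assoc]
    | false :: rest =>
      have hsplit : rest.takeWhile (fun x => x == false) ++ rest.dropWhile (fun x => x == false) = rest :=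
        List.takeWhile_append_dropWhile
      have hrun : ∀ x ∈ rest.takeWhile (fun x => x == false), x = false := by
        intro x hx
        simpa using List.mem_takeWhile_imp hx
      have hlen2 : (rest.takeWhile (fun x => x == false)).length +
          (rest.dropWhile (fun x => x == false)).length = rest.length := by
        rw [← List.length_append, hsplit]
      rw [pvBLoop_cons, pvALoopB_false_none]
      rw [show pvALoopB periods none (i + 1) rest =
            pvALoopB periods none
              (i + (1 + ((rest.takeWhile (fun x => x == false)).length : Int)))
              (rest.dropWhile (fun x => x == false)) from by
        conv_lhs => rw [← hsplit]
        rw [pvConsume_false _ hrun,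
          show (i + 1) + ((rest.takeWhile (fun x => x == false)).length : Int) =
            i + (1 + ((rest.takeWhile (fun x => x == false)).length : Int)) from by ring]]
      have hlt : (rest.dropWhile (fun x => x == false)).length < n := by
        have h1 : (rest.dropWhile (fun x => x == false)).length ≤ rest.length :=
          List.length_dropWhile_le _ _
        simp only [List.length_cons] at hn
        omega
      have hIH := ih (rest.dropWhile (fun x => x == false)).length hlt
        (rest.dropWhile (fun x => x == false)) rfl periods
        (i + (1 + ((rest.takeWhile (fun x => x == false)).length : Int)))
      rw [show i + (((false :: rest).length : ℕ) : Int) =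
            (i + (1 + ((rest.takeWhile (fun x => x == false)).length : Int))) +
              (((rest.dropWhile (fun x => x == false)).length : ℕ) : Int) from by
        push_cast [List.length_cons]
        omega]
      rw [hIH]
      simp

-- ===== VERDICT (by name: the statement is the Claim_ definition above) =====
theorem find_activity_periods_py_spec : Claim_equal_find_activity_periods_py := by
  intro records field value _
  unfold Spec_find_activity_periods_py find_activity_periods_py find_activity_periods_py_alt
  rw [pvALoop_eq_B]
  have h := pvMain (records.map (fun r => pvMatches r field value)).length _ rfl [] 0
  simp only [List.length_map, zero_add, List.nil_append] at h
  rw [← h]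
  cases hA : pvALoopB [] none 0 (records.map (fun r => pvMatches r field value)) with
  | mk periods start =>
    cases start <;> simp [pvFinish]
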